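-- pv_equiv track=rewrite | github.com/iwelsh47/AdventofCode | 2016/day02.py | find_next_button
-- ===== SOURCE A (Python) =====
-- def find_next_button(path: str, start: str, system: int = 0) -> str:
--   if system == 0: # normal system
--     next_state = {'1': {'U': '1', 'D': '4', 'L': '1', 'R': '2'},
--                   '2': {'U': '2', 'D': '5', 'L': '1', 'R': '3'},
--                   '3': {'U': '3', 'D': '6', 'L': '2', 'R': '3'},
--                   '4': {'U': '1', 'D': '7', 'L': '4', 'R': '5'},
--                   '5': {'U': '2', 'D': '8', 'L': '4', 'R': '6'},
--                   '6': {'U': '3', 'D': '9', 'L': '5', 'R': '6'},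
--                   '7': {'U': '4', 'D': '7', 'L': '7', 'R': '8'},
--                   '8': {'U': '5', 'D': '8', 'L': '7', 'R': '9'},
--                   '9': {'U': '6', 'D': '9', 'L': '8', 'R': '9'}}
--   else: # weird hex system
--     next_state = {'1': {'U': '1', 'D': '3', 'L': '1', 'R': '1'},
--                   '2': {'U': '2', 'D': '6', 'L': '2', 'R': '3'},
--                   '3': {'U': '1', 'D': '7', 'L': '2', 'R': '4'},
--                   '4': {'U': '4', 'D': '8', 'L': '3', 'R': '4'},
--                   '5': {'U': '5', 'D': '5', 'L': '5', 'R': '6'},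
--                   '6': {'U': '2', 'D': 'A', 'L': '5', 'R': '7'},
--                   '7': {'U': '3', 'D': 'B', 'L': '6', 'R': '8'},
--                   '8': {'U': '4', 'D': 'C', 'L': '7', 'R': '9'},
--                   '9': {'U': '9', 'D': '9', 'L': '8', 'R': '9'},
--                   'A': {'U': '6', 'D': 'A', 'L': 'A', 'R': 'B'},
--                   'B': {'U': '7', 'D': 'D', 'L': 'A', 'R': 'C'},
--                   'C': {'U': '8', 'D': 'C', 'L': 'B', 'R': 'C'},
--                   'D': {'U': 'B', 'D': 'D', 'L': 'D', 'R': 'D'}}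
--   for direction in path: start = next_state[start][direction]
--   return start
-- ===== SOURCE B (Python) =====
-- def find_next_button(path: str, start: str, system: int = 0) -> str:
--     if system == 0:
--         layout = ["123", "456", "789"]
--     else:
--         layout = ["  1  ", " 234 ", "56789", " ABC ", "  D  "]
--     pos = {layout[r][c]: (r, c)
--            for r in range(len(layout)) for c in range(len(layout[r]))
--            if layout[r][c] != ' '}
--     delta = {'U': (-1, 0), 'D': (1, 0), 'L': (0, -1), 'R': (0, 1)}
--     for d in path:
--         r, c = pos[start]
--         dr, dc = delta[d]
--         nr, nc = r + dr, c + dc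
--         if 0 <= nr < len(layout) and 0 <= nc < len(layout[nr]) and layout[nr][nc] != ' ':
--             start = layout[nr][nc]
--     return start
-- ===== Notes on version B (the rewrite author's own statement) =====
-- stated objective: idiomatic
-- what changed: Replaces A's two hand-written 36/52-entry transition tables by 2D keypad layouts with a key->coordinate map and direction deltas, moving only when the target cell exists and is non-blank.
import Mathlib
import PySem

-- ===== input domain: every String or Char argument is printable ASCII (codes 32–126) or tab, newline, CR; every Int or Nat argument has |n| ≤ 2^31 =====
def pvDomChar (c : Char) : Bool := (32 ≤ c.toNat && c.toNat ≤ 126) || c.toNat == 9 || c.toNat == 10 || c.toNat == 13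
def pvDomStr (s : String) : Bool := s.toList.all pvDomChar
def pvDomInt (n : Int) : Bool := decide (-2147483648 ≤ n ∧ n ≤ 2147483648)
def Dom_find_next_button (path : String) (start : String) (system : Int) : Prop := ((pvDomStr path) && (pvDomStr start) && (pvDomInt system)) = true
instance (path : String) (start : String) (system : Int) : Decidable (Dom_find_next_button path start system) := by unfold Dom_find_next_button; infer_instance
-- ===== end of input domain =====

-- B replaces A's hand-written transition tables by 2D keypad layouts with coordinate deltas (idiomatic; same cost).
-- Both ports model Python's KeyError (bad start key or a direction outside UDLR) as Option.none; Pre_ excludes exactly those inputs.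

-- ===== PORT A =====
-- the two transition tables, transliterated literally
def pvNextState0 : PySem.Dict String (PySem.Dict Char String) := PySem.Dict.ofList
  [("1", PySem.Dict.ofList [('U',"1"),('D',"4"),('L',"1"),('R',"2")]),
   ("2", PySem.Dict.ofList [('U',"2"),('D',"5"),('L',"1"),('R',"3")]),
   ("3", PySem.Dict.ofList [('U',"3"),('D',"6"),('L',"2"),('R',"3")]),
   ("4", PySem.Dict.ofList [('U',"1"),('D',"7"),('L',"4"),('R',"5")]),
   ("5", PySem.Dict.ofList [('U',"2"),('D',"8"),('L',"4"),('R',"6")]),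
   ("6", PySem.Dict.ofList [('U',"3"),('D',"9"),('L',"5"),('R',"6")]),
   ("7", PySem.Dict.ofList [('U',"4"),('D',"7"),('L',"7"),('R',"8")]),
   ("8", PySem.Dict.ofList [('U',"5"),('D',"8"),('L',"7"),('R',"9")]),
   ("9", PySem.Dict.ofList [('U',"6"),('D',"9"),('L',"8"),('R',"9")])]

def pvNextState1 : PySem.Dict String (PySem.Dict Char String) := PySem.Dict.ofList
  [("1", PySem.Dict.ofList [('U',"1"),('D',"3"),('L',"1"),('R',"1")]),
   ("2", PySem.Dict.ofList [('U',"2"),('D',"6"),('L',"2"),('R',"3")]),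
   ("3", PySem.Dict.ofList [('U',"1"),('D',"7"),('L',"2"),('R',"4")]),
   ("4", PySem.Dict.ofList [('U',"4"),('D',"8"),('L',"3"),('R',"4")]),
   ("5", PySem.Dict.ofList [('U',"5"),('D',"5"),('L',"5"),('R',"6")]),
   ("6", PySem.Dict.ofList [('U',"2"),('D',"A"),('L',"5"),('R',"7")]),
   ("7", PySem.Dict.ofList [('U',"3"),('D',"B"),('L',"6"),('R',"8")]),
   ("8", PySem.Dict.ofList [('U',"4"),('D',"C"),('L',"7"),('R',"9")]),
   ("9", PySem.Dict.ofList [('U',"9"),('D',"9"),('L',"8"),('R',"9")]),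
   ("A", PySem.Dict.ofList [('U',"6"),('D',"A"),('L',"A"),('R',"B")]),
   ("B", PySem.Dict.ofList [('U',"7"),('D',"D"),('L',"A"),('R',"C")]),
   ("C", PySem.Dict.ofList [('U',"8"),('D',"C"),('L',"B"),('R',"C")]),
   ("D", PySem.Dict.ofList [('U',"B"),('D',"D"),('L',"D"),('R',"D")])]

-- next_state[start][direction]; a missing key (KeyError in Python) is none, excluded by Pre_
def pvStepA (ns : PySem.Dict String (PySem.Dict Char String)) (s : String) (d : Char) : Option String :=
  (PySem.Dict.get? ns s).bind fun row => PySem.Dict.get? row d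

def find_next_button (path : String) (start : String) (system : Int) : String :=
  let ns := if system == 0 then pvNextState0 else pvNextState1
  (path.toList.foldl (fun st direction => st.bind fun s => pvStepA ns s direction)
      (some start)).getD ""

-- ===== PORT B =====
def pvLayout0 : List String := ["123", "456", "789"]
def pvLayout1 : List String := ["  1  ", " 234 ", "56789", " ABC ", "  D  "]

-- the pos dict: key character (as a 1-char string) → (row, col)
def pvPos (layout : List String) : PySem.Dict String (Int × Int) := PySem.Dict.ofList
  ((PySem.List.enumerate layout).flatMap fun rrow =>
    (PySem.List.enumerate rrow.2.toList).filterMap fun cch =>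
      if cch.2 ≠ ' ' then some (String.ofList [cch.2], (rrow.1, cch.1)) else none)

def pvDelta : PySem.Dict Char (Int × Int) := PySem.Dict.ofList
  [('U', (-1, 0)), ('D', (1, 0)), ('L', (0, -1)), ('R', (0, 1))]

-- one step of B's loop: pos[start] and delta[d] (KeyError → none), then move if the target
-- cell exists and is a key, reading the new key off the layout
def pvStepB (layout : List String) (cur : String) (d : Char) : Option String :=
  (PySem.Dict.get? (pvPos layout) cur).bind fun rc =>
    (PySem.Dict.get? pvDelta d).bind fun dl =>
      let nr := rc.1 + dl.1
      let nc := rc.2 + dl.2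
      match PySem.List.pyGet? layout nr with
      | some row =>
        if decide (0 ≤ nr) && decide (0 ≤ nc) && decide (nc < (row.length : Int)) &&
            ((PySem.List.pyGet? row.toList nc).elim false (fun ch => ch != ' '))
        then some ((PySem.List.pyGet? row.toList nc).elim "" (fun ch => String.ofList [ch]))
        else some cur
      | none => some cur

def find_next_button_alt (path : String) (start : String) (system : Int) : String :=
  let layout := if system == 0 then pvLayout0 else pvLayout1
  (path.toList.foldl (fun st d => st.bind fun cur => pvStepB layout cur d)
      (some start)).getD ""

-- ===== PRECONDITION & SPEC =====
def pvKeys0 : List String := ["1","2","3","4","5","6","7","8","9"]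
def pvKeys1 : List String := ["1","2","3","4","5","6","7","8","9","A","B","C","D"]

-- Pre_ excludes exactly the inputs where Python A raises KeyError: a path character outside 'UDLR',
-- or a nonempty path starting from a string that is not a key of the selected keypad.
def Pre_find_next_button (path : String) (start : String) (system : Int) : Prop :=
  (path.toList = [] ∨ start ∈ (if system == 0 then pvKeys0 else pvKeys1)) ∧
  path.toList.all (fun c => c ∈ (['U','D','L','R'] : List Char)) = true
instance (path : String) (start : String) (system : Int) : Decidable (Pre_find_next_button path start system) := by unfold Pre_find_next_button; infer_instance

def pvWitness_find_next_button : String × String × Int := ("U", "5", 0)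

def Spec_find_next_button (path : String) (start : String) (system : Int) (out : String) : Prop := out = find_next_button_alt path start system
instance (path : String) (start : String) (system : Int) (out : String) : Decidable (Spec_find_next_button path start system out) := by unfold Spec_find_next_button; infer_instance

-- ===== CLAIM (what is proved, stated in full; the proofs are below) =====
def Claim_equal_find_next_button : Prop := ∀ (path : String) (start : String) (system : Int), Dom_find_next_button path start system → Pre_find_next_button path start system → Spec_find_next_button path start system (find_next_button path start system)

-- ===== LEMMAS AND PROOFS =====

-- the single-step correspondence, checked by computation on the finite keypads
theorem pvStepOK0 : ∀ s ∈ pvKeys0, ∀ d ∈ (['U','D','L','R'] : List Char),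
    ∃ s' ∈ pvKeys0, pvStepA pvNextState0 s d = some s' ∧ pvStepB pvLayout0 s d = some s' := by
  intro s hs d hd
  fin_cases hs <;> fin_cases hd <;> decide

theorem pvStepOK1 : ∀ s ∈ pvKeys1, ∀ d ∈ (['U','D','L','R'] : List Char),
    ∃ s' ∈ pvKeys1, pvStepA pvNextState1 s d = some s' ∧ pvStepB pvLayout1 s d = some s' := by
  intro s hs d hd
  fin_cases hs <;> fin_cases hd <;> decide

-- the two folds stay in lockstep along any valid path
theorem pvFold_agree (ns : PySem.Dict String (PySem.Dict Char String)) (layout : List String)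
    (keys : List String)
    (hstep : ∀ s ∈ keys, ∀ d ∈ (['U','D','L','R'] : List Char),
      ∃ s' ∈ keys, pvStepA ns s d = some s' ∧ pvStepB layout s d = some s') :
    ∀ (cs : List Char), (∀ c ∈ cs, c ∈ (['U','D','L','R'] : List Char)) → ∀ s ∈ keys,
      ∃ s' ∈ keys,
        cs.foldl (fun st direction => st.bind fun t => pvStepA ns t direction) (some s) = some s' ∧
        cs.foldl (fun st d => st.bind fun cur => pvStepB layout cur d) (some s) = some s' := by
  intro cs
  induction cs with
  | nil => intro _ s hs; exact ⟨s, hs, rfl, rfl⟩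
  | cons c cs ih =>
    intro hcs s hs
    obtain ⟨s₁, hs₁, hA, hB⟩ := hstep s hs c (hcs c (List.mem_cons_self ..))
    obtain ⟨s', hs', hA', hB'⟩ := ih (fun d hd => hcs d (List.mem_cons_of_mem _ hd)) s₁ hs₁
    refine ⟨s', hs', ?_, ?_⟩
    · simpa [List.foldl_cons, Option.bind, hA] using hA'
    · simpa [List.foldl_cons, Option.bind, hB] using hB'

-- ===== VERDICT (by name: the statement is the Claim_ definition above) =====
theorem find_next_button_spec : Claim_equal_find_next_button := by
  unfold Claim_equal_find_next_button
  intro path start system _ hpre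
  unfold Spec_find_next_button find_next_button find_next_button_alt
  obtain ⟨hstart, hpathB⟩ := hpre
  have hpath : ∀ c ∈ path.toList, c ∈ (['U','D','L','R'] : List Char) := by
    simpa [List.all_eq_true] using hpathB
  rcases hstart with hnil | hstart
  · rw [hnil]; rfl
  · by_cases h : system == 0
    · simp only [h, if_pos]
      rw [if_pos h] at hstart
      obtain ⟨s', _, hA, hB⟩ :=
        pvFold_agree pvNextState0 pvLayout0 pvKeys0 pvStepOK0 path.toList hpath start hstart
      rw [hA, hB]
    · simp only [h, Bool.false_eq_true, if_false]
      rw [if_neg h] at hstart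
      obtain ⟨s', _, hA, hB⟩ :=
        pvFold_agree pvNextState1 pvLayout1 pvKeys1 pvStepOK1 path.toList hpath start hstart
      rw [hA, hB]
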